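-- pv_equiv track=rewrite | github.com/Felicity0710/My-Slay-The-Spire | Tools/python/simple_bot.py | estimate_damage
-- ===== SOURCE A (Python) =====
-- from typing import Any, Dict, Optional
--
-- def estimate_damage(card: Dict[str, Any]) -> int:
--     text = card.get("description", "")
--     best = 0
--     current = []
--     for ch in text:
--         if ch.isdigit():
--             current.append(ch)
--             continue
--
--         if current:
--             best = max(best, int("".join(current)))
--             current = []
--
--     if current:
--         best = max(best, int("".join(current)))
--     return best
-- ===== SOURCE B (Python) =====
-- def estimate_damage(card):
--     text = card.get("description", "")
--     masked = "".join(ch if ch.isdigit() else " " for ch in text)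
--     return max([0] + [int(run) for run in masked.split()])
-- ===== Notes on version B (the rewrite author's own statement) =====
-- stated objective: idiomatic
-- what changed: Replaces the per-character digit-buffer state machine (accumulate, flush on non-digit, final flush) with a two-phase pipeline: mask every non-digit to a space, split() the masked string into the digit runs, and take the max of the parsed runs with 0 as the default.
import Mathlib
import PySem

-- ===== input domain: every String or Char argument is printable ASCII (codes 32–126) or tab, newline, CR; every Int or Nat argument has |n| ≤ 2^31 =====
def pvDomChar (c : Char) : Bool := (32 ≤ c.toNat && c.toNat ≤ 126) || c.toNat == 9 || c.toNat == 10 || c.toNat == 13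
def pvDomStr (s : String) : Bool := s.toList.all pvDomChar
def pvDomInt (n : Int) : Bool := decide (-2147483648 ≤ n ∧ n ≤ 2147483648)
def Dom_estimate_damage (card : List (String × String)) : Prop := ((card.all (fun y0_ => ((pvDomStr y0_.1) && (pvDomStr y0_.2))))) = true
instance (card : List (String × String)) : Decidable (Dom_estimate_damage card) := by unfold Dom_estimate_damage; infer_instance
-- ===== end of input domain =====

-- B replaces A's per-character digit-buffer state machine by a two-phase pipeline: mask non-digits to spaces, split, parse, max.

-- ===== PORT A =====
-- int("".join(current)): in both programs this is only applied to runs of digit characters,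
-- on which int() never raises; the .getD 0 is a totality guard only
def pvVal (r : List Char) : Int := (PySem.Int.ofChars? r).getD 0

-- A's 'for ch in text' loop, state = (best, current)
def pvLoopA : List Char → Int → List Char → Int
  | [], best, cur => if cur.isEmpty then best else max best (pvVal cur)
  | c :: cs, best, cur =>
    if PySem.Chars.isdigit c then pvLoopA cs best (cur ++ [c])
    else if cur.isEmpty then pvLoopA cs best cur
    else pvLoopA cs (max best (pvVal cur)) []

def estimate_damage (card : List (String × String)) : Int :=
  let text := (PySem.Dict.mk card).getD "description" ""
  pvLoopA text.toList 0 []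

-- ===== PORT B =====
def estimate_damage_alt (card : List (String × String)) : Int :=
  let text := (PySem.Dict.mk card).getD "description" ""
  let masked := text.toList.map (fun ch => if PySem.Chars.isdigit ch then ch else ' ')
  let runs := PySem.Chars.split₀ masked
  (PySem.List.max? ((0 : Int) :: runs.map pvVal) (fun y => y)).getD 0

-- ===== PRECONDITION & SPEC =====
def Spec_estimate_damage (card : List (String × String)) (out : Int) : Prop := out = estimate_damage_alt card
instance (card : List (String × String)) (out : Int) : Decidable (Spec_estimate_damage card out) := by unfold Spec_estimate_damage; infer_instance

-- ===== CLAIM (what is proved, stated in full; the proofs are below) =====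
def Claim_equal_estimate_damage : Prop := ∀ (card : List (String × String)), Dom_estimate_damage card → Spec_estimate_damage card (estimate_damage card)

-- ===== LEMMAS AND PROOFS =====

-- B's masking function, named for the proofs
def pvMask (c : Char) : Char := if PySem.Chars.isdigit c then c else ' '

-- a digit character is not Python whitespace
theorem pv_isspace_of_isdigit (c : Char) (h : PySem.Chars.isdigit c = true) : PySem.Chars.isspace c = false := by
  have hd : 48 ≤ c.toNat ∧ c.toNat ≤ 57 := by
    simp only [PySem.Chars.isdigit, Bool.and_eq_true, decide_eq_true_eq, Char.le_def] at h
    exact ⟨UInt32.le_iff_toNat_le.mp h.1, UInt32.le_iff_toNat_le.mp h.2⟩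
  simp only [PySem.Chars.isspace, Bool.or_eq_false_iff, Bool.and_eq_false_iff,
    decide_eq_false_iff_not]
  omega

-- split₀.go's accumulator is a finished prefix of the result
theorem pv_go_acc (l : List Char) : ∀ cur acc, PySem.Chars.split₀.go l cur acc = acc.reverse ++ PySem.Chars.split₀.go l cur [] := by
  induction l with
  | nil => intro cur acc; by_cases h : cur.isEmpty <;> simp [PySem.Chars.split₀.go, h]
  | cons c cs ih =>
    intro cur acc
    by_cases hs : PySem.Chars.isspace c <;> by_cases hc : cur.isEmpty <;>
      simp only [PySem.Chars.split₀.go, hs, hc, if_true, if_false, Bool.false_eq_true]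
    · exact ih _ _
    · rw [ih [] (cur.reverse :: acc), ih [] [cur.reverse]]; simp
    · exact ih _ _
    · exact ih _ _

-- A's running loop equals the fold of max over the values of the runs that split₀ finds in the masked text
theorem pv_main (l : List Char) : ∀ (best : Int) (cur : List Char),
    pvLoopA l best cur
      = ((PySem.Chars.split₀.go (l.map pvMask) cur.reverse []).map pvVal).foldl max best := by
  induction l with
  | nil =>
    intro best cur
    by_cases hc : cur.isEmpty <;>
      simp [pvLoopA, PySem.Chars.split₀.go, hc]
  | cons c cs ih =>
    intro best cur
    by_cases hd : PySem.Chars.isdigit c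
    · have hs := pv_isspace_of_isdigit c hd
      simp only [List.map_cons, pvMask, hd, if_true, pvLoopA, PySem.Chars.split₀.go, hs,
        Bool.false_eq_true]
      rw [ih best (cur ++ [c])]
      simp
    · have hs : PySem.Chars.isspace ' ' = true := by decide
      by_cases hc : cur.isEmpty
      · have hcl : cur = [] := List.isEmpty_iff.mp hc
        subst hcl
        simp only [List.map_cons, pvMask, hd, if_false, pvLoopA, PySem.Chars.split₀.go, hs,
          Bool.false_eq_true, List.isEmpty_nil, if_true, List.reverse_nil]
        exact ih best []
      · simp only [List.map_cons, pvMask, hd, if_false, pvLoopA, PySem.Chars.split₀.go, hs,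
          Bool.false_eq_true, hc, if_true, List.isEmpty_reverse]
        rw [pv_go_acc, ih (max best (pvVal cur)) []]
        simp

-- ===== VERDICT (by name: the statement is the Claim_ definition above) =====
theorem estimate_damage_spec : Claim_equal_estimate_damage := by
  intro card _
  unfold Spec_estimate_damage estimate_damage estimate_damage_alt PySem.Chars.split₀
  rw [pv_main]
  show _ = (PySem.List.max? ((0 : Int) :: _) (fun y => y)).getD 0
  rw [PySem.List.max?_id_cons]
  rfl
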